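-- pv_equiv track=rewrite | github.com/kaskanio/chatbot_builder | src/components/transformation/transformation.py | format_intent_string
-- ===== SOURCE A (Python) =====
-- def format_intent_string(intent_string, pretrained_entities, trainable_entities, synonyms):
--     parts = intent_string.split(' ')
--     formatted_parts = []
--     current_string = []
--     for part in parts:
--         if part.startswith('PE:') or part.startswith('TE:') or part.startswith('S:'):
--             if current_string:
--                 formatted_parts.append('"{}"'.format(" ".join(current_string)))
--                 current_string = []
--             entity_type, entity_name = part.split(':')
--             if entity_type == 'PE':
--                 entity_values = pretrained_entities.get(entity_name, [])
--                 formatted_parts.append('{}:{}[{}]'.format(entity_type, entity_name, ", ".join("'{}'".format(value) for value in entity_values)))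
--             else:
--                 formatted_parts.append('{}:{}'.format(entity_type, entity_name))
--         else:
--             current_string.append(part)
--     if current_string:
--         formatted_parts.append('"{}"'.format(" ".join(current_string)))
--     return ' '.join(formatted_parts)
-- ===== SOURCE B (Python) =====
-- def format_intent_string(intent_string, pretrained_entities, trainable_entities, synonyms):
--     def is_entity(tok):
--         return tok.startswith('PE:') or tok.startswith('TE:') or tok.startswith('S:')
--
--     def fmt_entity(tok):
--         entity_type, entity_name = tok.split(':')
--         if entity_type == 'PE':
--             values = pretrained_entities.get(entity_name, [])
--             return '{}:{}[{}]'.format(entity_type, entity_name,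
--                                       ", ".join("'{}'".format(v) for v in values))
--         return '{}:{}'.format(entity_type, entity_name)
--
--     def emit_runs(tokens):
--         if not tokens:
--             return []
--         k = is_entity(tokens[0])
--         i = 1
--         while i < len(tokens) and is_entity(tokens[i]) == k:
--             i += 1
--         run, rest = tokens[:i], tokens[i:]
--         if k:
--             return [fmt_entity(t) for t in run] + emit_runs(rest)
--         return ['"{}"'.format(' '.join(run))] + emit_runs(rest)
--
--     return ' '.join(emit_runs(intent_string.split(' ')))
-- ===== Notes on version B (the rewrite author's own statement) =====
-- stated objective: alternative
-- what changed: Replaces A's single fold with a pending-words accumulator that is flushed at each entity marker by a recursion that partitions the token list into maximal entity/non-entity runs and formats each run at once.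
import Mathlib
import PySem

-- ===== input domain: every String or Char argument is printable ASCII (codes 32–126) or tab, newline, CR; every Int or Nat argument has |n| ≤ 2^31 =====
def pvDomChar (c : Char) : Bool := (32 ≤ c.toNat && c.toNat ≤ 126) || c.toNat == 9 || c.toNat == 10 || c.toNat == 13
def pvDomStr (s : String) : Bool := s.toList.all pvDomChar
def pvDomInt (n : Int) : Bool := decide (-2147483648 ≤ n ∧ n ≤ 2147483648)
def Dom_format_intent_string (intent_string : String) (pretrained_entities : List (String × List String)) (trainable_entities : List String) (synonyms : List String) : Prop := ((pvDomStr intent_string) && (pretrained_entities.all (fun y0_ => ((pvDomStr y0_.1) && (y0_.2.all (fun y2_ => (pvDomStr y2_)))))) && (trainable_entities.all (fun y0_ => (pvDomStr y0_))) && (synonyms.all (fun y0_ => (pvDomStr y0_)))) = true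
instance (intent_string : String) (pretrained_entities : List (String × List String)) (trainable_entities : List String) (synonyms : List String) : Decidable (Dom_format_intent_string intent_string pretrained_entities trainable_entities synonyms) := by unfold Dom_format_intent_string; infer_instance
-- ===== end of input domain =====

-- B formats the tokens by recursively partitioning them into maximal entity / non-entity runs instead
-- of A's fold with a pending-words accumulator flushed at each entity marker; same cost, alternative decomposition.

-- ===== PORT A =====
-- part.startswith('PE:') or part.startswith('TE:') or part.startswith('S:')
def pvIsEntA (part : String) : Bool :=
  PySem.Str.startswith part "PE:" || PySem.Str.startswith part "TE:" || PySem.Str.startswith part "S:"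
def pvFlushA (current_string : List String) : List String :=
  if current_string.isEmpty then [] else ["\"" ++ PySem.Str.join " " current_string ++ "\""]
def pvFmtEntA (pretrained : PySem.Dict String (List String)) (part : String) : String :=
  match PySem.Str.split? part ":" with
  | some [entity_type, entity_name] =>
      if entity_type == "PE" then
        entity_type ++ ":" ++ entity_name ++ "[" ++
          PySem.Str.join ", " ((pretrained.getD entity_name []).map (fun value => "'" ++ value ++ "'")) ++ "]"
      else entity_type ++ ":" ++ entity_name
  | _ => ""
def pvStepA (pretrained : PySem.Dict String (List String)) (st : List String × List String)
    (part : String) : List String × List String :=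
  if pvIsEntA part then (st.1 ++ pvFlushA st.2 ++ [pvFmtEntA pretrained part], [])
  else (st.1, st.2 ++ [part])

def format_intent_string (intent_string : String) (pretrained_entities : List (String × List String)) (trainable_entities : List String) (synonyms : List String) : String :=
  PySem.Str.join " "
    ((((PySem.Str.split? intent_string " ").getD []).foldl (pvStepA (PySem.Dict.mk pretrained_entities)) ([], [])).1
      ++ pvFlushA ((((PySem.Str.split? intent_string " ").getD []).foldl (pvStepA (PySem.Dict.mk pretrained_entities)) ([], [])).2))

-- ===== PORT B =====
def pvIsEntB (tok : String) : Bool :=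
  PySem.Str.startswith tok "PE:" || PySem.Str.startswith tok "TE:" || PySem.Str.startswith tok "S:"
def pvFmtEntB (pretrained : PySem.Dict String (List String)) (tok : String) : String :=
  match PySem.Str.split? tok ":" with
  | some [entity_type, entity_name] =>
      if entity_type == "PE" then
        entity_type ++ ":" ++ entity_name ++ "[" ++
          PySem.Str.join ", " ((pretrained.getD entity_name []).map (fun value => "'" ++ value ++ "'")) ++ "]"
      else entity_type ++ ":" ++ entity_name
  | _ => ""
def pvEmitRuns (pretrained : PySem.Dict String (List String)) : List String → List String
  | [] => []
  | t :: ts =>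
      let k := pvIsEntB t
      let run := t :: ts.takeWhile (fun x => pvIsEntB x == k)
      let rest := ts.dropWhile (fun x => pvIsEntB x == k)
      (if k then run.map (pvFmtEntB pretrained)
       else ["\"" ++ PySem.Str.join " " run ++ "\""]) ++ pvEmitRuns pretrained rest
  termination_by l => l.length
  decreasing_by exact Nat.lt_succ_of_le (List.length_dropWhile_le _ _)


def format_intent_string_alt (intent_string : String) (pretrained_entities : List (String × List String)) (trainable_entities : List String) (synonyms : List String) : String :=
  PySem.Str.join " "
    (pvEmitRuns (PySem.Dict.mk pretrained_entities) ((PySem.Str.split? intent_string " ").getD []))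

-- ===== PRECONDITION & SPEC =====
-- Pre_ excludes exactly the inputs on which A raises ValueError: a token starting with
-- 'PE:'/'TE:'/'S:' whose number of ':' is not exactly one makes `part.split(':')` unpacking fail.
def Pre_format_intent_string (intent_string : String) (pretrained_entities : List (String × List String)) (trainable_entities : List String) (synonyms : List String) : Prop :=
  ∀ tok ∈ (PySem.Str.split? intent_string " ").getD [],
    (PySem.Str.startswith tok "PE:" || PySem.Str.startswith tok "TE:" || PySem.Str.startswith tok "S:") = true →
    PySem.Str.count tok ":" = 1
instance (intent_string : String) (pretrained_entities : List (String × List String)) (trainable_entities : List String) (synonyms : List String) : Decidable (Pre_format_intent_string intent_string pretrained_entities trainable_entities synonyms) := by unfold Pre_format_intent_string; infer_instance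

def pvWitness_format_intent_string : String × (List (String × List String)) × List String × List String :=
  ("book a PE:city flight TE:date", [("city", ["athens", "patras"])], [], [])

def Spec_format_intent_string (intent_string : String) (pretrained_entities : List (String × List String)) (trainable_entities : List String) (synonyms : List String) (out : String) : Prop := out = format_intent_string_alt intent_string pretrained_entities trainable_entities synonyms
instance (intent_string : String) (pretrained_entities : List (String × List String)) (trainable_entities : List String) (synonyms : List String) (out : String) : Decidable (Spec_format_intent_string intent_string pretrained_entities trainable_entities synonyms out) := by unfold Spec_format_intent_string; infer_instance

-- ===== CLAIM (what is proved, stated in full; the proofs are below) =====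
def Claim_equal_format_intent_string : Prop := ∀ (intent_string : String) (pretrained_entities : List (String × List String)) (trainable_entities : List String) (synonyms : List String), Dom_format_intent_string intent_string pretrained_entities trainable_entities synonyms → Pre_format_intent_string intent_string pretrained_entities trainable_entities synonyms → Spec_format_intent_string intent_string pretrained_entities trainable_entities synonyms (format_intent_string intent_string pretrained_entities trainable_entities synonyms)

-- ===== LEMMAS AND PROOFS =====
theorem pvFmtAB : pvFmtEntA = pvFmtEntB := rfl
theorem pvEmitRuns_nil (d : PySem.Dict String (List String)) : pvEmitRuns d [] = [] := by
  rw [pvEmitRuns]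

def pvAcc (pretrained : PySem.Dict String (List String)) : List String → List String → List String
  | cs, [] => pvFlushA cs
  | cs, t :: ts =>
      if pvIsEntA t then pvFlushA cs ++ pvFmtEntA pretrained t :: pvAcc pretrained [] ts
      else pvAcc pretrained (cs ++ [t]) ts

theorem pvFoldA_eq_acc (d : PySem.Dict String (List String)) (ts : List String) :
    ∀ fp cs, (ts.foldl (pvStepA d) (fp, cs)).1 ++ pvFlushA (ts.foldl (pvStepA d) (fp, cs)).2
      = fp ++ pvAcc d cs ts := by
  induction ts with
  | nil => intro fp cs; simp [pvAcc]
  | cons t ts ih =>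
      intro fp cs
      by_cases h : pvIsEntA t = true
      · simp only [List.foldl_cons, pvStepA, h, if_pos, pvAcc]
        rw [ih]; simp
      · simp only [List.foldl_cons, pvStepA, h, pvAcc, if_neg, Bool.false_eq_true,
          not_false_eq_true, ite_false]
        rw [ih]

theorem pvEmitRuns_cons_ent (d : PySem.Dict String (List String)) (t : String) (ts : List String)
    (h : pvIsEntB t = true) : pvEmitRuns d (t :: ts) = pvFmtEntB d t :: pvEmitRuns d ts := by
  cases ts with
  | nil => simp [pvEmitRuns, h]
  | cons u us =>
      by_cases hu : pvIsEntB u = true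
      · rw [pvEmitRuns, pvEmitRuns]
        simp [h, hu]
      · rw [pvEmitRuns]
        simp [h, hu, List.takeWhile, List.dropWhile]

theorem pvAcc_eq_emitRuns (d : PySem.Dict String (List String)) (ts : List String) :
    ∀ cs, pvAcc d cs ts =
      if cs.isEmpty then pvEmitRuns d ts
      else ("\"" ++ PySem.Str.join " " (cs ++ ts.takeWhile (fun x => pvIsEntB x == false)) ++ "\"") ::
        pvEmitRuns d (ts.dropWhile (fun x => pvIsEntB x == false)) := by
  induction ts with
  | nil =>
      intro cs
      cases cs with
      | nil => simp [pvAcc, pvFlushA, pvEmitRuns]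
      | cons c cs' => simp [pvAcc, pvFlushA, pvEmitRuns_nil]
  | cons t ts ih =>
      intro cs
      by_cases h : pvIsEntA t = true
      · have hb : pvIsEntB t = true := h
        rw [pvAcc]
        simp only [h, if_pos]
        rw [ih [], pvEmitRuns_cons_ent d t ts hb]
        cases cs with
        | nil => simp [pvFlushA, pvEmitRuns_cons_ent d t ts hb, pvFmtAB]
        | cons c cs' =>
            simp [pvFlushA, List.takeWhile, List.dropWhile, hb, pvEmitRuns_cons_ent d t ts hb, pvFmtAB]
      · have hb : pvIsEntB t = false := Bool.eq_false_iff.mpr h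
        rw [pvAcc]
        simp only [h, Bool.false_eq_true, not_false_eq_true, ite_false, if_neg]
        rw [ih (cs ++ [t])]
        cases cs with
        | nil =>
            simp only [List.nil_append, List.isEmpty_cons, List.isEmpty_nil, Bool.false_eq_true,
              ite_false, ite_true, reduceCtorEq]
            rw [pvEmitRuns]
            simp [hb, List.takeWhile, List.dropWhile]
        | cons c cs' =>
            simp [List.takeWhile, List.dropWhile, hb, List.append_assoc]

-- ===== VERDICT (by name: the statement is the Claim_ definition above) =====
theorem format_intent_string_spec : Claim_equal_format_intent_string := by
  intro intent_string pretrained_entities trainable_entities synonyms _ _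
  unfold Spec_format_intent_string format_intent_string format_intent_string_alt
  rw [pvFoldA_eq_acc, pvAcc_eq_emitRuns]
  simp
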